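-- pv_equiv track=rewrite | github.com/lmmx/braces | ppb.py | pretty_braces
-- ===== SOURCE A (Python) =====
-- def pretty_braces(expr):
--     lines = []
--     stack = []  # tracks column of each '{'
--     i = 0
--     line = ""
--     while i < len(expr):
--         c = expr[i]
--         if c == "{":
--             line += "{"
--             lines.append(line)
--             stack.append(len(line))  # record column of '{'
--             line = " " * stack[-1]   # start new line at brace column
--             i += 1
--         elif c == "}":
--             if line.strip():
--                 lines.append(line.rstrip(","))
--             line = " " * stack.pop() + "}"
--             lines.append(line)
--             line = " " * (stack[-1] if stack else 0)
--             i += 1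
--         elif c == ",":
--             line += ","
--             lines.append(line)
--             line = " " * (stack[-1] if stack else 0)
--             i += 1
--         else:
--             line += c
--             i += 1
--     if line.strip():
--         lines.append(line)
--     return "\n".join(lines)
-- ===== SOURCE B (Python) =====
-- def pretty_braces(expr):
--     # Recursive descent over the nested brace structure instead of an explicit
--     # index loop with a column stack; builds the list of lines via recursion.
--     lines = []
--
--     def walk(i, col):
--         # Render chars from index i at enclosing column col; return the index
--         # just past the '}' that closes this level (or len(expr)).
--         buf = ""
--         while i < len(expr):
--             c = expr[i]
--             i += 1
--             if c == "{":
--                 lines.append(" " * col + buf + "{")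
--                 i = walk(i, col + len(buf) + 1)
--                 buf = ""
--             elif c == "}":
--                 if buf.strip():
--                     lines.append(" " * col + buf)
--                 lines.append(" " * col + "}")
--                 return i
--             elif c == ",":
--                 lines.append(" " * col + buf + ",")
--                 buf = ""
--             else:
--                 buf += c
--         if buf.strip():
--             lines.append(" " * col + buf)
--         return i
--
--     walk(0, 0)
--     return "\n".join(lines)
-- ===== Notes on version B (the rewrite author's own statement) =====
-- stated objective: alternative
-- what changed: Replaces A's single index loop with an explicit column stack and mutable current-line string by a recursive descent over the nested brace structure: each nesting level is rendered by a recursive walk that carries only its column and the plain-text buffer accumulated since the last flush (the buffer never contains a comma, so A's rstrip(',') disappears).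
-- outside the precondition, e.g. on pretty_braces('}'): A raises IndexError, B returns '}'
import Mathlib
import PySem

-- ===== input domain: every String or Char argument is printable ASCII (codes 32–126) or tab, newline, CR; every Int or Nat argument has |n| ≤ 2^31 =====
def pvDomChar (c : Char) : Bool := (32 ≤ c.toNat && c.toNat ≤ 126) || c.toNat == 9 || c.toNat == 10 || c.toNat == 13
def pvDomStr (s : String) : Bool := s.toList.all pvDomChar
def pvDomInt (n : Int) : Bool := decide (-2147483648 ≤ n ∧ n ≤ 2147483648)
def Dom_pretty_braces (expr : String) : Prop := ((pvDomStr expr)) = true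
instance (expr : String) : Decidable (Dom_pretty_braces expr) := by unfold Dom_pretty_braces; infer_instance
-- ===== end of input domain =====

-- B replaces A's index loop + explicit column stack by a recursive descent over
-- the nested brace structure (same output; objective: alternative decomposition).

-- ===== PORT A =====
-- exact port of line.rstrip(","): remove trailing ',' characters
def pvRstripComma (l : List Char) : List Char :=
  (List.dropWhile (fun x => x == ',') l.reverse).reverse

-- A's loop; the Python stack (append/pop/[-1] at the end) is modelled head-first.
-- On '}' with empty stack Python raises IndexError (stack.pop()); Pre_ excludes
-- exactly those inputs, the port uses headD 0 / tail there.
def prettyA : List Char → List (List Char) → List Nat → List Char → List (List Char)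
  | [], lines, _stack, line =>
      if (PySem.Chars.strip line).isEmpty then lines else lines ++ [line]
  | c :: rest, lines, stack, line =>
      if c = '{' then
        let line2 := line ++ ['{']
        prettyA rest (lines ++ [line2]) (line2.length :: stack)
          (List.replicate line2.length ' ')
      else if c = '}' then
        let lines2 := if (PySem.Chars.strip line).isEmpty then lines
                      else lines ++ [pvRstripComma line]
        let stack2 := stack.tail
        prettyA rest (lines2 ++ [List.replicate (stack.headD 0) ' ' ++ ['}']]) stack2
          (List.replicate (stack2.headD 0) ' ')
      else if c = ',' then
        prettyA rest (lines ++ [line ++ [',']]) stack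
          (List.replicate (stack.headD 0) ' ')
      else
        prettyA rest lines stack (line ++ [c])

def pretty_braces (expr : String) : String :=
  String.ofList (PySem.Chars.join ['\n'] (prettyA expr.toList [] [] []))

-- ===== PORT B =====
-- recursive descent (Source B's walk); fuel = remaining length makes it structural,
-- the fuel-exhausted branch is unreachable for fuel ≥ length of the input
def prettyB : Nat → List Char → Nat → List Char → List (List Char) × List Char
  | _, [], col, buf =>
      (if (PySem.Chars.strip buf).isEmpty then []
       else [List.replicate col ' ' ++ buf], [])
  | 0, c :: rest, _, _ => ([], c :: rest)
  | f + 1, c :: rest, col, buf =>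
      if c = '{' then
        let r1 := prettyB f rest (col + buf.length + 1) []
        let r2 := prettyB f r1.2 col []
        ((List.replicate col ' ' ++ buf ++ ['{']) :: (r1.1 ++ r2.1), r2.2)
      else if c = '}' then
        ((if (PySem.Chars.strip buf).isEmpty then []
          else [List.replicate col ' ' ++ buf]) ++
           [List.replicate col ' ' ++ ['}']], rest)
      else if c = ',' then
        let r := prettyB f rest col []
        ((List.replicate col ' ' ++ buf ++ [',']) :: r.1, r.2)
      else
        prettyB f rest col (buf ++ [c])

def pretty_braces_alt (expr : String) : String :=
  String.ofList (PySem.Chars.join ['\n'] (prettyB expr.toList.length expr.toList 0 []).1)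

-- ===== PRECONDITION & SPEC =====
-- Pre_ excludes exactly the inputs with a '}' not matched by an earlier '{':
-- there A raises IndexError (stack.pop() on the empty stack).
def Pre_pretty_braces (expr : String) : Prop :=
  ∀ n < expr.toList.length + 1,
    ((expr.toList.take n).count '}') ≤ ((expr.toList.take n).count '{')
instance (expr : String) : Decidable (Pre_pretty_braces expr) := by
  unfold Pre_pretty_braces; infer_instance

def pvWitness_pretty_braces : String := "a{b,c{d}}"

def Spec_pretty_braces (expr : String) (out : String) : Prop := out = pretty_braces_alt expr
instance (expr : String) (out : String) : Decidable (Spec_pretty_braces expr out) := by unfold Spec_pretty_braces; infer_instance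

-- ===== CLAIM (what is proved, stated in full; the proofs are below) =====
def Claim_equal_pretty_braces : Prop := ∀ (expr : String), Dom_pretty_braces expr → Pre_pretty_braces expr → Spec_pretty_braces expr (pretty_braces expr)

-- ===== LEMMAS AND PROOFS =====

-- depth scanner: tracks the '{'-nesting depth, none = a '}' below depth 0
def pvRun : List Char → Nat → Option Nat
  | [], d => some d
  | c :: r, d =>
      if c = '{' then pvRun r (d + 1)
      else if c = '}' then (if d = 0 then none else pvRun r (d - 1))
      else pvRun r d

theorem pvRun_append (p q : List Char) (d : Nat) :
    pvRun (p ++ q) d = (pvRun p d).bind (fun e => pvRun q e) := by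
  induction p generalizing d with
  | nil => simp [pvRun]
  | cons c r ih =>
      by_cases h1 : c = '{'
      · simp [pvRun, h1, ih]
      · by_cases h2 : c = '}'
        · by_cases hd : d = 0
          · simp [pvRun, h1, h2, hd]
          · simp [pvRun, h1, h2, hd, ih]
        · simp [pvRun, h1, h2, ih]

theorem pvRun_mono (p : List Char) (d e k : Nat) (h : pvRun p d = some e) :
    pvRun p (d + k) = some (e + k) := by
  induction p generalizing d e with
  | nil => simp [pvRun] at h ⊢; omega
  | cons c r ih =>
      by_cases h1 : c = '{'
      · simp only [pvRun, if_pos h1] at h ⊢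
        have := ih (d + 1) e h
        have harith : d + 1 + k = d + k + 1 := by omega
        rw [harith] at this
        exact this
      · by_cases h2 : c = '}'
        · by_cases hd : d = 0
          · simp [pvRun, h1, h2, hd] at h
          · simp only [pvRun, if_neg h1, if_pos h2, if_neg hd] at h
            have hdk : ¬ d + k = 0 := by omega
            simp only [pvRun, if_neg h1, if_pos h2, if_neg hdk]
            have := ih (d - 1) e h
            have harith : d + k - 1 = d - 1 + k := by omega
            rw [harith]
            exact this
        · simp only [pvRun, if_neg h1, if_neg h2] at h ⊢
          exact ih d e h

-- balanced prefix counts give a successful depth scan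
theorem pvCount_run (cs : List Char) (d : Nat)
    (h : ∀ n, ((cs.take n).count '}') ≤ d + ((cs.take n).count '{')) :
    pvRun cs d ≠ none := by
  induction cs generalizing d with
  | nil => simp [pvRun]
  | cons c r ih =>
      by_cases h1 : c = '{'
      · simp only [pvRun, if_pos h1]
        apply ih
        intro n
        have := h (n + 1)
        rw [List.take_succ_cons] at this
        simp [List.count_cons, h1] at this
        omega
      · by_cases h2 : c = '}'
        · have hd : 1 ≤ d := by
            have := h 1
            rw [List.take_succ_cons] at this
            simp [List.count_cons, h2, List.take_zero] at this
            omega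
          have hd0 : ¬ d = 0 := by omega
          simp only [pvRun, if_neg h1, if_pos h2, if_neg hd0]
          apply ih
          intro n
          have := h (n + 1)
          rw [List.take_succ_cons] at this
          simp [List.count_cons, h1, h2] at this
          omega
        · simp only [pvRun, if_neg h1, if_neg h2]
          apply ih
          intro n
          have := h (n + 1)
          rw [List.take_succ_cons] at this
          simp [List.count_cons, h1, h2] at this
          omega

-- strip ignores leading spaces
theorem strip_sp_append (n : Nat) (b : List Char) :
    PySem.Chars.strip (List.replicate n ' ' ++ b) = PySem.Chars.strip b := by
  induction n with
  | zero => simp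
  | succ m ih =>
      have hsp : PySem.Chars.isspace ' ' = true := by decide
      simp only [List.replicate_succ, List.cons_append]
      simpa [PySem.Chars.strip, PySem.Chars.lstrip, hsp] using ih

theorem strip_sp (n : Nat) : PySem.Chars.strip (List.replicate n ' ') = [] := by
  have := strip_sp_append n []
  simpa [PySem.Chars.strip, PySem.Chars.lstrip, PySem.Chars.rstrip] using this

theorem rstripComma_id (l : List Char) (h : ',' ∉ l) : pvRstripComma l = l := by
  unfold pvRstripComma
  have hd : List.dropWhile (fun x => x == ',') l.reverse = l.reverse := by
    cases hr : l.reverse with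
    | nil => simp
    | cons c t =>
        have hc : c ∈ l := by
          have : c ∈ l.reverse := by rw [hr]; exact List.mem_cons_self
          simpa using this
        have hcc : (c == ',') = false := by
          simp only [beq_eq_false_iff_ne]
          intro he; exact h (he ▸ hc)
        simp [hcc]
  rw [hd, List.reverse_reverse]

-- (prettyB …).2 is no longer than the input
theorem prettyB_len (f : Nat) (cs : List Char) (col : Nat) (buf : List Char) :
    (prettyB f cs col buf).2.length ≤ cs.length := by
  induction f generalizing cs col buf with
  | zero => cases cs <;> simp [prettyB]
  | succ f ih =>
      cases cs with
      | nil => simp [prettyB]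
      | cons c rest =>
          by_cases h1 : c = '{'
          · simp only [prettyB, if_pos h1]
            have i1 := ih rest (col + buf.length + 1) []
            have i2 := ih (prettyB f rest (col + buf.length + 1) []).2 col []
            simp only [List.length_cons]
            omega
          · by_cases h2 : c = '}'
            · simp [prettyB, h1, h2]
            · by_cases h3 : c = ','
              · simp only [prettyB, if_neg h1, if_neg h2, if_pos h3]
                have := ih rest col []
                simp only [List.length_cons]
                omega
              · simp only [prettyB, if_neg h1, if_neg h2, if_neg h3]
                have := ih rest col (buf ++ [c])
                simp only [List.length_cons]
                omega

-- B consumes everything, or exactly up to the first unmatched '}'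
theorem prettyB_rest (f : Nat) (cs : List Char) (col : Nat) (buf : List Char)
    (hf : cs.length ≤ f) :
    (prettyB f cs col buf).2 = [] ∨
      ∃ p, cs = p ++ '}' :: (prettyB f cs col buf).2 ∧ pvRun p 0 = some 0 := by
  induction f generalizing cs col buf with
  | zero =>
      cases cs with
      | nil => left; simp [prettyB]
      | cons c r => simp at hf
  | succ f ih =>
      cases cs with
      | nil => left; simp [prettyB]
      | cons c rest =>
          have hr : rest.length ≤ f := by simp at hf; omega
          by_cases h1 : c = '{'
          · simp only [prettyB, if_pos h1]
            rcases ih rest (col + buf.length + 1) [] hr with h | ⟨p1, he1, hrun1⟩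
            · have : (prettyB f (prettyB f rest (col + buf.length + 1) []).2 col []).2 = [] := by
                rw [h]; simp [prettyB]
              left; simpa using this
            · have hlen2 : (prettyB f rest (col + buf.length + 1) []).2.length ≤ f := by
                have := prettyB_len f rest (col + buf.length + 1) []
                omega
              rcases ih (prettyB f rest (col + buf.length + 1) []).2 col [] hlen2 with
                h | ⟨p2, he2, hrun2⟩
              · left; simpa using h
              · right
                refine ⟨'{' :: p1 ++ '}' :: p2, ?_, ?_⟩
                · rw [h1]
                  have hsh : ('{' :: p1 ++ '}' :: p2) ++
                      '}' :: (prettyB f (prettyB f rest (col + buf.length + 1) []).2 col []).2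
                      = '{' :: (p1 ++ '}' :: (p2 ++
                        '}' :: (prettyB f (prettyB f rest (col + buf.length + 1) []).2 col []).2)) := by
                    simp
                  rw [hsh, ← he2, ← he1]
                · have hp1 : pvRun p1 1 = some 1 := by
                    have := pvRun_mono p1 0 0 1 hrun1
                    simpa using this
                  have : pvRun ('{' :: p1 ++ '}' :: p2) 0
                      = (pvRun p1 1).bind (fun e => pvRun ('}' :: p2) e) := by
                    simp only [List.cons_append, pvRun, if_pos rfl]
                    exact pvRun_append p1 ('}' :: p2) 1
                  rw [this, hp1]
                  simpa [pvRun] using hrun2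
          · by_cases h2 : c = '}'
            · right
              refine ⟨[], ?_, by simp [pvRun]⟩
              simp [prettyB, h1, h2]
            · by_cases h3 : c = ','
              · simp only [prettyB, if_neg h1, if_neg h2, if_pos h3]
                rcases ih rest col [] hr with h | ⟨p, he, hrun⟩
                · left; exact h
                · right
                  refine ⟨c :: p, by rw [List.cons_append, ← he], ?_⟩
                  simpa [pvRun, h1, h2] using hrun
              · simp only [prettyB, if_neg h1, if_neg h2, if_neg h3]
                rcases ih rest col (buf ++ [c]) hr with h | ⟨p, he, hrun⟩
                · left; exact h
                · right
                  refine ⟨c :: p, by rw [List.cons_append, ← he], ?_⟩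
                  simpa [pvRun, h1, h2] using hrun

-- the main simulation: A's loop at stack (col :: stack) runs B's walk at column
-- col, then continues behind the matching '}' with the rest of the stack
theorem main_sim (f : Nat) (cs : List Char) (col : Nat) (stack : List Nat)
    (lines : List (List Char)) (buf : List Char)
    (hf : cs.length ≤ f) (hb : ',' ∉ buf) :
    prettyA cs lines (col :: stack) (List.replicate col ' ' ++ buf)
      = prettyA (prettyB f cs col buf).2 (lines ++ (prettyB f cs col buf).1) stack
          (List.replicate (stack.headD 0) ' ') := by
  induction f generalizing cs col stack lines buf with
  | zero =>
      cases cs with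
      | cons c r => simp at hf
      | nil =>
          simp only [prettyB, prettyA, strip_sp_append, strip_sp, List.isEmpty_nil,
            if_true]
          by_cases h : (PySem.Chars.strip buf).isEmpty
          · simp [h]
          · simp [h]
  | succ f ih =>
      cases cs with
      | nil =>
          simp only [prettyB, prettyA, strip_sp_append, strip_sp, List.isEmpty_nil,
            if_true]
          by_cases h : (PySem.Chars.strip buf).isEmpty
          · simp [h]
          · simp [h]
      | cons c rest =>
          have hr : rest.length ≤ f := by simp at hf; omega
          by_cases h1 : c = '{'
          · simp only [prettyA, prettyB, if_pos h1]
            have hlen : (List.replicate col ' ' ++ buf ++ ['{']).length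
                = col + buf.length + 1 := by simp; omega
            rw [hlen]
            have i1 := ih rest (col + buf.length + 1) (col :: stack)
              (lines ++ [List.replicate col ' ' ++ buf ++ ['{']]) []
              hr (by simp)
            simp only [List.append_nil, List.headD_cons] at i1
            rw [i1]
            have hlen2 : (prettyB f rest (col + buf.length + 1) []).2.length ≤ f := by
              have := prettyB_len f rest (col + buf.length + 1) []
              omega
            have i2 := ih (prettyB f rest (col + buf.length + 1) []).2 col stack
              ((lines ++ [List.replicate col ' ' ++ buf ++ ['{']]) ++
                (prettyB f rest (col + buf.length + 1) []).1) []
              hlen2 (by simp)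
            simp only [List.append_nil, List.headD_cons] at i2
            rw [i2]
            congr 1
            simp
          · by_cases h2 : c = '}'
            · simp only [prettyA, prettyB, if_neg h1, if_pos h2, if_neg (h1 : c ≠ '{')]
              have hstrip : PySem.Chars.strip (List.replicate col ' ' ++ buf)
                  = PySem.Chars.strip buf := strip_sp_append col buf
              have hcomma : ',' ∉ List.replicate col ' ' ++ buf := by
                intro hm
                rcases List.mem_append.mp hm with hm | hm
                · have := List.eq_of_mem_replicate hm
                  simp at this
                · exact hb hm
              rw [hstrip, rstripComma_id _ hcomma]
              simp only [List.headD_cons, List.tail_cons]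
              by_cases h : (PySem.Chars.strip buf).isEmpty
              · simp [h]
              · simp [h]
            · by_cases h3 : c = ','
              · simp only [prettyA, prettyB, if_neg h1, if_neg h2, if_pos h3]
                simp only [List.headD_cons]
                have i1 := ih rest col stack
                  (lines ++ [List.replicate col ' ' ++ (buf ++ [','])]) []
                  hr (by simp)
                simp only [List.append_nil] at i1
                rw [List.append_assoc, i1]
                congr 1
                simp
              · simp only [prettyA, prettyB, if_neg h1, if_neg h2, if_neg h3]
                have hb' : ',' ∉ buf ++ [c] := by
                  intro hm
                  rcases List.mem_append.mp hm with hm | hm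
                  · exact hb hm
                  · simp at hm; exact h3 hm.symm
                have := ih rest col stack lines (buf ++ [c]) hr hb'
                rw [← List.append_assoc] at this
                exact this

-- a trailing 0 sentinel on the stack is invisible while the scan stays balanced
theorem pad_stack (cs : List Char) (lines : List (List Char)) (stack : List Nat)
    (line : List Char) (h : pvRun cs stack.length ≠ none) :
    prettyA cs lines stack line = prettyA cs lines (stack ++ [0]) line := by
  induction cs generalizing lines stack line with
  | nil => simp [prettyA]
  | cons c rest ih =>
      by_cases h1 : c = '{'
      · subst h1
        simp only [prettyA, if_pos rfl]
        have hcons : (line ++ ['{']).length :: (stack ++ [0])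
            = ((line ++ ['{']).length :: stack) ++ [0] := by simp
        rw [hcons]
        apply ih
        simp only [pvRun, if_pos rfl] at h
        simpa using h
      · by_cases h2 : c = '}'
        · subst h2
          cases stack with
          | nil =>
              exfalso
              apply h
              simp [pvRun]
          | cons s0 s =>
              simp only [prettyA, if_neg h1, if_pos rfl, List.cons_append,
                List.headD_cons, List.tail_cons]
              have hrec : pvRun rest s.length ≠ none := by
                simp only [pvRun, if_neg h1, if_pos rfl, List.length_cons] at h
                simpa using h
              cases s with
              | nil => simpa using ih _ _ _ hrec
              | cons t0 t => simpa using ih _ _ _ hrec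
        · have hrec : pvRun rest stack.length ≠ none := by
            simp only [pvRun, if_neg h1, if_neg h2] at h
            exact h
          by_cases h3 : c = ','
          · simp only [prettyA, if_neg h1, if_neg h2, if_pos h3]
            cases stack with
            | nil => simpa using ih _ _ _ hrec
            | cons s0 s => simpa using ih _ _ _ hrec
          · simp only [prettyA, if_neg h1, if_neg h2, if_neg h3]
            exact ih _ _ _ hrec

-- ===== VERDICT (by name: the statement is the Claim_ definition above) =====
theorem pretty_braces_spec : Claim_equal_pretty_braces := by
  intro expr _hdom hpre
  unfold Spec_pretty_braces pretty_braces pretty_braces_alt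
  have hcount : ∀ n, ((expr.toList.take n).count '}') ≤ ((expr.toList.take n).count '{') := by
    intro n
    by_cases hn : n < expr.toList.length + 1
    · exact hpre n hn
    · have hle : expr.toList.length ≤ n := by omega
      rw [List.take_of_length_le hle]
      have := hpre expr.toList.length (by omega)
      rwa [List.take_of_length_le (le_refl _)] at this
  have hrun : pvRun expr.toList 0 ≠ none := pvCount_run expr.toList 0 (by simpa using hcount)
  have h1 : prettyA expr.toList [] [] [] = prettyA expr.toList [] [0] [] := by
    simpa using pad_stack expr.toList [] [] [] (by simpa using hrun)
  have h2 := main_sim expr.toList.length expr.toList 0 [] [] [] (le_refl _) (by simp)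
  simp only [List.replicate_zero, List.nil_append, List.append_nil,
    List.headD_nil] at h2
  have hrest : (prettyB expr.toList.length expr.toList 0 []).2 = [] := by
    rcases prettyB_rest expr.toList.length expr.toList 0 [] (le_refl _) with h | ⟨p, he, hrunp⟩
    · exact h
    · exfalso
      apply hrun
      rw [he, pvRun_append, hrunp]
      simp [pvRun]
  rw [h1, h2, hrest]
  simp [prettyA, show PySem.Chars.strip ([] : List Char) = [] from by decide]
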